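-- pv_equiv track=rewrite | github.com/copenlu/multilingual-typology-probing | preprocess_treebank.py | merge_attributes
-- ===== SOURCE A (Python) =====
-- from typing import List, Tuple, Dict, Any
--
-- def merge_attributes(tokens: List[str], value_to_attr_dict: Dict[str, str]) -> Dict[str, str]:
--     """
--     Returns a dictionary containing Unimorph attributes, and the values taken on after the merge.
--     """
--     # First, build a list that naively merges everything
--     merged_attributes: Dict[str, List[str]] = {}
--     for t in tokens:
--         for attr, val in t["um_feats"].items():
--             if attr not in merged_attributes:
--                 merged_attributes[attr] = []
--
--             merged_attributes[attr].append(val)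
--
--     # Second, remove attributes with multiple values (even if they are the same)
--     final_attributes: Dict[str, str] = {}
--     for attr, vals in merged_attributes.items():
--         if len(vals) == 1:
--             final_attributes[attr] = vals[0]
--
--     return final_attributes
-- ===== SOURCE B (Python) =====
-- from typing import List, Tuple, Dict, Any
--
-- def merge_attributes(tokens: List[str], value_to_attr_dict: Dict[str, str]) -> Dict[str, str]:
--     """
--     Single pass: keep attributes while they have exactly one occurrence; any
--     second occurrence (even with the same value) bans the attribute for good.
--     """
--     final_attributes: Dict[str, str] = {}
--     banned = set()
--     for t in tokens:
--         for attr, val in t["um_feats"].items():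
--             if attr in banned:
--                 continue
--             if attr in final_attributes:
--                 del final_attributes[attr]
--                 banned.add(attr)
--             else:
--                 final_attributes[attr] = val
--     return final_attributes
-- ===== Notes on version B (the rewrite author's own statement) =====
-- stated objective: simpler
-- what changed: Replaced the two-phase build-all-value-lists-then-filter with a single maintain-and-discard pass keeping only a str->str dict plus a banned set, so no per-attribute value lists are ever built.
import Mathlib
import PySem

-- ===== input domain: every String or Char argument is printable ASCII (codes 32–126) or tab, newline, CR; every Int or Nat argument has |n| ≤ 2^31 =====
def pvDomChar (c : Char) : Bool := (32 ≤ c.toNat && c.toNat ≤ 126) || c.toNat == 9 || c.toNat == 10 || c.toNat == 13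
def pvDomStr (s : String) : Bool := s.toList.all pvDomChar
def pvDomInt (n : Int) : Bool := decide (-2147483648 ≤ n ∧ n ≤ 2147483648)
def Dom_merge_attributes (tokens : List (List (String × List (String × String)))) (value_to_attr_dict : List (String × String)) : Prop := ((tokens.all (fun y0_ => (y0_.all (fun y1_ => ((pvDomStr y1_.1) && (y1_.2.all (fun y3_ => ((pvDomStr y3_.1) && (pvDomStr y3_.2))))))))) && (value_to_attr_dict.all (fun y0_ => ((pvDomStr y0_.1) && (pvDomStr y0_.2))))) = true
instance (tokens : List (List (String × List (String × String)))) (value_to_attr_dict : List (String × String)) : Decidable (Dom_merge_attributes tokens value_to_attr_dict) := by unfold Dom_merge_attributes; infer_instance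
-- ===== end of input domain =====

-- B replaces A's two-phase build-then-filter with one maintain-and-discard pass (a str→str dict plus a banned set); return values proved equal, no mutation involved.

-- ===== PORT A =====
-- t["um_feats"] raises KeyError when the key is missing: Pre_ below requires it; '.getD … []' is
-- only reached with the key present.  vals[0] is ported as pyGetD vals 0 "" under len(vals) == 1.
def merge_attributes (tokens : List (List (String × List (String × String)))) (value_to_attr_dict : List (String × String)) : List (String × String) :=
  let merged : PySem.Dict String (List String) :=
    tokens.foldl (fun m t =>
      ((PySem.Dict.ofList ((PySem.Dict.ofList t).getD "um_feats" [])).items).foldl (fun m p =>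
        let m := if m.contains p.1 then m else m.insert p.1 []
        m.modify p.1 [] (fun vs => vs ++ [p.2])) m)
      PySem.Dict.empty
  let final : PySem.Dict String String :=
    merged.items.foldl (fun f p =>
      if p.2.length = 1 then f.insert p.1 (PySem.List.pyGetD p.2 0 "") else f)
      PySem.Dict.empty
  final.items

-- ===== PORT B =====
def merge_attributes_alt (tokens : List (List (String × List (String × String)))) (value_to_attr_dict : List (String × String)) : List (String × String) :=
  let st : PySem.Dict String String × PySem.Set String :=
    tokens.foldl (fun st t =>
      ((PySem.Dict.ofList ((PySem.Dict.ofList t).getD "um_feats" [])).items).foldl (fun st p =>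
        if PySem.Set.contains st.2 p.1 then st
        else if st.1.contains p.1 then (st.1.erase p.1, PySem.Set.add st.2 p.1)
        else (st.1.insert p.1 p.2, st.2)) st)
      (PySem.Dict.empty, PySem.Set.empty)
  st.1.items

-- ===== PRECONDITION & SPEC =====
-- A raises KeyError on any token dict without the key "um_feats"; Pre_ excludes exactly those inputs.
def Pre_merge_attributes (tokens : List (List (String × List (String × String)))) (value_to_attr_dict : List (String × String)) : Prop :=
  ∀ t ∈ tokens, "um_feats" ∈ t.map Prod.fst
instance (tokens : List (List (String × List (String × String)))) (value_to_attr_dict : List (String × String)) : Decidable (Pre_merge_attributes tokens value_to_attr_dict) := by unfold Pre_merge_attributes; infer_instance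
def pvWitness_merge_attributes : (List (List (String × List (String × String)))) × (List (String × String)) :=
  ([[("um_feats", [("Case", "Nom"), ("Num", "Sing")])], [("um_feats", [("Num", "Sing")])]], [])
def Spec_merge_attributes (tokens : List (List (String × List (String × String)))) (value_to_attr_dict : List (String × String)) (out : List (String × String)) : Prop := out = merge_attributes_alt tokens value_to_attr_dict
instance (tokens : List (List (String × List (String × String)))) (value_to_attr_dict : List (String × String)) (out : List (String × String)) : Decidable (Spec_merge_attributes tokens value_to_attr_dict out) := by unfold Spec_merge_attributes; infer_instance

-- ===== CLAIM (what is proved, stated in full; the proofs are below) =====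
def Claim_equal_merge_attributes : Prop := ∀ (tokens : List (List (String × List (String × String)))) (value_to_attr_dict : List (String × String)), Dom_merge_attributes tokens value_to_attr_dict → Pre_merge_attributes tokens value_to_attr_dict → Spec_merge_attributes tokens value_to_attr_dict (merge_attributes tokens value_to_attr_dict)

-- ===== LEMMAS AND PROOFS =====

def pvFeats (t : List (String × List (String × String))) : List (String × String) :=
  (PySem.Dict.ofList ((PySem.Dict.ofList t).getD "um_feats" [])).items

def pvFA (m : PySem.Dict String (List String)) (p : String × String) : PySem.Dict String (List String) :=
  let m := if m.contains p.1 then m else m.insert p.1 []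
  m.modify p.1 [] (fun vs => vs ++ [p.2])

def pvFB (st : PySem.Dict String String × PySem.Set String) (p : String × String) :
    PySem.Dict String String × PySem.Set String :=
  if PySem.Set.contains st.2 p.1 then st
  else if st.1.contains p.1 then (st.1.erase p.1, PySem.Set.add st.2 p.1)
  else (st.1.insert p.1 p.2, st.2)

def pvFF (f : PySem.Dict String String) (q : String × List String) : PySem.Dict String String :=
  if q.2.length = 1 then f.insert q.1 (PySem.List.pyGetD q.2 0 "") else f

def pvSel (q : String × List String) : Option (String × String) :=
  if q.2.length = 1 then some (q.1, PySem.List.pyGetD q.2 0 "") else none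

def pvInv (m : PySem.Dict String (List String)) (st : PySem.Dict String String × PySem.Set String) : Prop :=
  m.keys.Nodup ∧
  (∀ q ∈ m.items, q.2 ≠ []) ∧
  (∀ a : String, a ∈ st.2 ↔ ∃ vs, (a, vs) ∈ m.items ∧ 2 ≤ vs.length) ∧
  st.1.items = m.items.filterMap pvSel

lemma pvInv_init : pvInv PySem.Dict.empty (PySem.Dict.empty, PySem.Set.empty) := by
  refine ⟨by simp [PySem.Dict.empty, PySem.Dict.keys], by simp [PySem.Dict.empty], ?_, by simp [PySem.Dict.empty]⟩
  intro a
  simp [PySem.Set.empty, PySem.Dict.empty]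

lemma pvNotMem_of_not_contains (m : PySem.Dict String (List String)) (a : String)
    (h : m.contains a = false) : ∀ q ∈ m.items, q.1 ≠ a := by
  intro q hq
  have := List.any_eq_false.mp h q hq
  simpa using this

lemma pvFA_items (m : PySem.Dict String (List String)) (a v : String) (hk : m.keys.Nodup) :
    (pvFA m (a, v)).items =
      if m.contains a then m.items.map (fun q => if q.1 = a then (q.1, q.2 ++ [v]) else q)
      else m.items ++ [(a, [v])] := by
  by_cases h : m.contains a = true
  · simp only [pvFA, h, if_true, PySem.Dict.modify]
    rw [PySem.Dict.items_insert_of_contains _ _ h]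
    apply List.map_congr_left
    intro q hq
    by_cases hqa : q.1 = a
    · have hv : m.getD a [] = q.2 := by
        subst hqa; exact PySem.Dict.getD_of_mem_items _ hq hk []
      simp [hqa, hv]
    · simp [hqa]
  · have h' : m.contains a = false := by simpa using h
    simp only [pvFA, h', Bool.false_eq_true, if_false, PySem.Dict.modify]
    have hc : (m.insert a ([] : List String)).contains a = true := PySem.Dict.contains_insert_self _ _ _
    rw [PySem.Dict.items_insert_of_contains _ _ hc,
        PySem.Dict.items_insert_of_not_contains _ _ h',
        PySem.Dict.getD_insert_self, List.map_append]
    have hid : List.map (fun p => if (p.1 == a) = true then (a, ([] : List String) ++ [v]) else p) m.items = m.items := by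
      conv_rhs => rw [← List.map_id m.items]
      apply List.map_congr_left
      intro q hq
      have := pvNotMem_of_not_contains m a h' q hq
      simp [this]
    rw [hid]
    simp

-- keys after the A-step
lemma pvFA_keys_nodup (m : PySem.Dict String (List String)) (a v : String) (hk : m.keys.Nodup) :
    (pvFA m (a, v)).keys.Nodup := by
  rw [PySem.Dict.keys, pvFA_items m a v hk]
  by_cases h : m.contains a = true
  · simp only [h, if_true]
    have : List.map Prod.fst (m.items.map (fun q => if q.1 = a then (q.1, q.2 ++ [v]) else q))
        = List.map Prod.fst m.items := by
      rw [List.map_map]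
      apply List.map_congr_left
      intro q hq
      by_cases hqa : q.1 = a <;> simp [hqa]
    rw [this]
    exact hk
  · have h' : m.contains a = false := by simpa using h
    simp only [h', Bool.false_eq_true, if_false, List.map_append, List.map_cons, List.map_nil]
    rw [List.nodup_append]
    refine ⟨hk, List.nodup_singleton _, ?_⟩
    intro x hx y hy
    rw [List.mem_singleton] at hy
    subst hy
    intro hxa
    subst hxa
    obtain ⟨q, hq, hq1⟩ := List.mem_map.mp hx
    exact pvNotMem_of_not_contains m x h' q hq hq1

-- membership of pairs in the mapped items
lemma pvMem_map_items (m : PySem.Dict String (List String)) (a v : String)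
    (x : String) (vs : List String) :
    ((x, vs) ∈ m.items.map (fun q => if q.1 = a then (q.1, q.2 ++ [v]) else q)) ↔
      (x ≠ a ∧ (x, vs) ∈ m.items) ∨ (x = a ∧ ∃ vs₀, (a, vs₀) ∈ m.items ∧ vs = vs₀ ++ [v]) := by
  rw [List.mem_map]
  constructor
  · rintro ⟨⟨qa, qv⟩, hq, hqe⟩
    by_cases hqa : qa = a
    · subst hqa
      simp only [if_pos rfl] at hqe
      cases hqe
      right
      exact ⟨rfl, qv, hq, rfl⟩
    · simp only [if_neg hqa] at hqe
      cases hqe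
      left
      exact ⟨hqa, hq⟩
  · rintro (⟨hxa, hmem⟩ | ⟨hxa, vs₀, hmem, rfl⟩)
    · exact ⟨(x, vs), hmem, by simp [hxa]⟩
    · subst hxa
      exact ⟨(x, vs₀), hmem, by simp⟩

-- value lists stay nonempty
lemma pvFA_nonnil (m : PySem.Dict String (List String)) (a v : String) (hk : m.keys.Nodup)
    (hne : ∀ q ∈ m.items, q.2 ≠ []) : ∀ q ∈ (pvFA m (a, v)).items, q.2 ≠ [] := by
  rw [pvFA_items m a v hk]
  by_cases h : m.contains a = true
  · simp only [h, if_true]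
    rintro ⟨x, vs⟩ hmem
    rcases (pvMem_map_items m a v x vs).mp hmem with ⟨_, hm⟩ | ⟨_, vs₀, _, rfl⟩
    · exact hne _ hm
    · simp
  · have h' : m.contains a = false := by simpa using h
    simp only [h', Bool.false_eq_true, if_false]
    intro q hq
    rcases List.mem_append.mp hq with hq | hq
    · exact hne _ hq
    · simp at hq
      subst hq
      simp

-- a key occurs in d.items iff contains
lemma pvContains_iff {ν : Type} (d : PySem.Dict String ν) (a : String) :
    d.contains a = true ↔ ∃ w, (a, w) ∈ d.items := by
  constructor
  · intro h
    obtain ⟨q, hq, hq1⟩ := List.any_eq_true.mp h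
    refine ⟨q.2, ?_⟩
    have : q.1 = a := by simpa using hq1
    simpa [← this] using hq
  · rintro ⟨w, hmem⟩
    exact List.any_eq_true.mpr ⟨(a, w), hmem, by simp⟩

-- unique value at a key under Nodup keys
lemma pvUnique (m : PySem.Dict String (List String)) (hk : m.keys.Nodup) {a : String}
    {vs vs' : List String} (h1 : (a, vs) ∈ m.items) (h2 : (a, vs') ∈ m.items) : vs = vs' := by
  have e1 := PySem.Dict.getD_of_mem_items _ h1 hk []
  have e2 := PySem.Dict.getD_of_mem_items _ h2 hk []
  rw [e1] at e2
  exact e2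

-- the erase/filterMap exchange
lemma pvFilterMap_erase (l : List (String × List String)) (a : String) :
    (l.filterMap pvSel).filter (fun r => !(r.1 == a)) =
      l.filterMap (fun q => if q.1 = a then none else pvSel q) := by
  rw [List.filter_filterMap]
  apply List.filterMap_congr
  intro q _
  by_cases hqa : q.1 = a
  · rw [if_pos hqa]
    unfold pvSel
    split
    · simp [Option.filter, hqa]
    · rfl
  · simp only [if_neg hqa]
    unfold pvSel
    split
    · simp [Option.filter, hqa]
    · rfl

-- THE STEP LEMMA
lemma pvInv_step (m : PySem.Dict String (List String)) (st : PySem.Dict String String × PySem.Set String)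
    (p : String × String) (h : pvInv m st) : pvInv (pvFA m p) (pvFB st p) := by
  obtain ⟨hk, hne, hban, hitems⟩ := h
  obtain ⟨a, v⟩ := p
  refine ⟨pvFA_keys_nodup m a v hk, pvFA_nonnil m a v hk hne, ?_⟩
  by_cases hb : a ∈ st.2
  -- CASE 1: banned
  · have hbr : PySem.Set.contains st.2 a = true := by simpa using hb
    obtain ⟨vs, hvs, hlen⟩ := (hban a).mp hb
    have hma : m.contains a = true := (pvContains_iff m a).mpr ⟨vs, hvs⟩
    have hitemsA := pvFA_items m a v hk
    rw [if_pos hma] at hitemsA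
    simp only [pvFB, hbr, if_true]
    constructor
    · intro x
      rw [hban x, hitemsA]
      constructor
      · rintro ⟨vs', hvs', hlen'⟩
        by_cases hxa : x = a
        · subst hxa
          exact ⟨vs ++ [v], (pvMem_map_items m x v x _).mpr (Or.inr ⟨rfl, vs, hvs, rfl⟩), by
            simp; omega⟩
        · exact ⟨vs', (pvMem_map_items m a v x vs').mpr (Or.inl ⟨hxa, hvs'⟩), hlen'⟩
      · rintro ⟨vs', hvs', hlen'⟩
        rcases (pvMem_map_items m a v x vs').mp hvs' with ⟨hxa, hm⟩ | ⟨hxa, vs₀, hm, rfl⟩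
        · exact ⟨vs', hm, hlen'⟩
        · subst hxa
          exact ⟨vs, hvs, hlen⟩
    · rw [hitems, hitemsA, List.filterMap_map]
      apply List.filterMap_congr
      intro q hq
      by_cases hqa : q.1 = a
      · have hq2 : q.2 = vs := by
          obtain ⟨q1, q2⟩ := q
          simp only at hqa
          subst hqa
          exact pvUnique m hk hq hvs
        simp only [Function.comp_apply, if_pos hqa, pvSel]
        rw [hq2]
        have l1 : ¬ (vs ++ [v]).length = 1 := by
          simp only [List.length_append, List.length_cons, List.length_nil]
          omega
        have l2 : ¬ vs.length = 1 := by omega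
        simp [l1, l2]
        intro hcon
        rw [hcon] at hlen
        simp at hlen
      · simp [Function.comp_apply, if_neg hqa]
  · have hbr : PySem.Set.contains st.2 a = false := by
      rw [Bool.eq_false_iff]
      intro hc
      exact hb (by simpa using hc)
    by_cases hf : st.1.contains a = true
    -- CASE 2: currently kept, second occurrence
    · obtain ⟨w, hw⟩ := (pvContains_iff st.1 a).mp hf
      rw [hitems] at hw
      obtain ⟨q, hq, hqs⟩ := List.mem_filterMap.mp hw
      have hq1 : q.1 = a ∧ q.2.length = 1 := by
        unfold pvSel at hqs
        split at hqs
        · cases hqs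
          exact ⟨rfl, by assumption⟩
        · cases hqs
      obtain ⟨hqa, hqlen⟩ := hq1
      have hvs : (a, q.2) ∈ m.items := by
        obtain ⟨q1, q2⟩ := q
        simp only at hqa
        subst hqa
        exact hq
      have hma : m.contains a = true := (pvContains_iff m a).mpr ⟨q.2, hvs⟩
      have hitemsA := pvFA_items m a v hk
      rw [if_pos hma] at hitemsA
      simp only [pvFB, hbr, Bool.false_eq_true, if_false, hf, if_true]
      constructor
      · intro x
        simp only [PySem.Set.mem_add]
        rw [hitemsA]
        constructor
        · rintro (hx | rfl)
          · obtain ⟨vs', hvs', hlen'⟩ := (hban x).mp hx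
            have hxa : x ≠ a := by
              rintro rfl
              have heq := pvUnique m hk hvs' hvs
              rw [heq, hqlen] at hlen'
              omega
            exact ⟨vs', (pvMem_map_items m a v x vs').mpr (Or.inl ⟨hxa, hvs'⟩), hlen'⟩
          · refine ⟨q.2 ++ [v], (pvMem_map_items m x v x _).mpr (Or.inr ⟨rfl, q.2, hvs, rfl⟩), ?_⟩
            simp only [List.length_append, List.length_cons, List.length_nil, hqlen]
            omega
        · rintro ⟨vs', hvs', hlen'⟩
          rcases (pvMem_map_items m a v x vs').mp hvs' with ⟨hxa, hm⟩ | ⟨hxa, vs₀, hm, rfl⟩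
          · exact Or.inl ((hban x).mpr ⟨vs', hm, hlen'⟩)
          · exact Or.inr hxa
      · show (st.1.erase a).items = _
        rw [PySem.Dict.erase]
        simp only
        rw [hitems, pvFilterMap_erase, hitemsA, List.filterMap_map]
        apply List.filterMap_congr
        intro r hr
        by_cases hra : r.1 = a
        · have hr2 : r.2 = q.2 := by
            obtain ⟨r1, r2⟩ := r
            simp only at hra
            subst hra
            exact pvUnique m hk hr hvs
          simp only [Function.comp_apply, if_pos hra]
          unfold pvSel
          rw [if_neg]
          simp only [List.length_append, List.length_cons, List.length_nil, hr2, hqlen]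
          omega
        · simp [Function.comp_apply, if_neg hra]
    -- CASE 3: fresh
    · have hf' : st.1.contains a = false := by simpa using hf
      have hma : m.contains a = false := by
        rw [Bool.eq_false_iff]
        intro hc
        obtain ⟨vs, hvs⟩ := (pvContains_iff m a).mp hc
        have hlen1 : 1 ≤ vs.length := by
          have := hne _ hvs
          cases vs with
          | nil => simp at this
          | cons x xs => simp
        by_cases hone : vs.length = 1
        · have : (a, PySem.List.pyGetD vs 0 "") ∈ st.1.items := by
            rw [hitems]
            exact List.mem_filterMap.mpr ⟨(a, vs), hvs, by simp [pvSel, hone]⟩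
          have : st.1.contains a = true := (pvContains_iff st.1 a).mpr ⟨_, this⟩
          rw [hf'] at this
          cases this
        · have : a ∈ st.2 := (hban a).mpr ⟨vs, hvs, by omega⟩
          exact hb this
      have hitemsA := pvFA_items m a v hk
      rw [hma] at hitemsA
      simp only [Bool.false_eq_true, if_false] at hitemsA
      simp only [pvFB, hbr, Bool.false_eq_true, if_false, hf', if_false]
      constructor
      · intro x
        rw [hban x, hitemsA]
        constructor
        · rintro ⟨vs', hvs', hlen'⟩
          exact ⟨vs', List.mem_append_left _ hvs', hlen'⟩
        · rintro ⟨vs', hvs', hlen'⟩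
          rcases List.mem_append.mp hvs' with hm | hm
          · exact ⟨vs', hm, hlen'⟩
          · rw [List.mem_singleton] at hm
            cases hm
            simp at hlen'
      · show (st.1.insert a v).items = _
        rw [PySem.Dict.items_insert_of_not_contains _ _ hf', hitemsA, List.filterMap_append,
            hitems]
        congr 1

lemma pvInv_foldl (L : List (String × String)) (m : PySem.Dict String (List String))
    (st : PySem.Dict String String × PySem.Set String) (h : pvInv m st) :
    pvInv (L.foldl pvFA m) (L.foldl pvFB st) := by
  induction L generalizing m st with
  | nil => exact h
  | cons p L ih => exact ih _ _ (pvInv_step m st p h)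

lemma pvInv_tokens (tokens : List (List (String × List (String × String))))
    (m : PySem.Dict String (List String)) (st : PySem.Dict String String × PySem.Set String)
    (h : pvInv m st) :
    pvInv (tokens.foldl (fun m t => (pvFeats t).foldl pvFA m) m)
          (tokens.foldl (fun st t => (pvFeats t).foldl pvFB st) st) := by
  induction tokens generalizing m st with
  | nil => exact h
  | cons t ts ih => exact ih _ _ (pvInv_foldl (pvFeats t) m st h)

lemma pvPhase2 (l : List (String × List String)) (f : PySem.Dict String String)
    (hfresh : ∀ q ∈ l, f.contains q.1 = false) (hnodup : (l.map Prod.fst).Nodup) :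
    (l.foldl pvFF f).items = f.items ++ l.filterMap pvSel := by
  induction l generalizing f with
  | nil => simp
  | cons q l ih =>
    simp only [List.map_cons, List.nodup_cons] at hnodup
    obtain ⟨hq1, hnd⟩ := hnodup
    simp only [List.foldl_cons]
    by_cases h1 : q.2.length = 1
    · have hq : pvFF f q = f.insert q.1 (PySem.List.pyGetD q.2 0 "") := by simp [pvFF, h1]
      rw [hq, ih _ ?_ hnd]
      · rw [PySem.Dict.items_insert_of_not_contains _ _ (hfresh q (by simp))]
        simp [pvSel, h1]
      · intro r hr
        rw [PySem.Dict.contains_insert]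
        have hne : r.1 ≠ q.1 := by
          intro e
          exact hq1 (e ▸ List.mem_map_of_mem hr)
        simp [hne, hfresh r (List.mem_cons_of_mem _ hr)]
    · have hq : pvFF f q = f := by simp [pvFF, h1]
      rw [hq, ih _ (fun r hr => hfresh r (List.mem_cons_of_mem _ hr)) hnd]
      simp [pvSel, h1]

-- ===== VERDICT (by name: the statement is the Claim_ definition above) =====
theorem merge_attributes_spec : Claim_equal_merge_attributes := by
  unfold Claim_equal_merge_attributes
  intro tokens vd _ _
  unfold Spec_merge_attributes
  obtain ⟨hk, hne, hban, hitems⟩ :=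
    pvInv_tokens tokens PySem.Dict.empty (PySem.Dict.empty, PySem.Set.empty) pvInv_init
  show ((tokens.foldl (fun m t => (pvFeats t).foldl pvFA m) PySem.Dict.empty).items.foldl pvFF
          PySem.Dict.empty).items
     = (tokens.foldl (fun st t => (pvFeats t).foldl pvFB st) (PySem.Dict.empty, PySem.Set.empty)).1.items
  rw [pvPhase2 _ _ (fun q _ => rfl) hk, hitems]
  rfl
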